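-- pv_equiv track=rewrite | github.com/Aaron-Lilly/symphainy-production | services/cobrix-parser/app/cobol_88_field_extractor.py | _clean_cobol_lines
-- ===== SOURCE A (Python) =====
-- from typing import Dict, List, Set, Tuple, Optional
--
-- def _clean_cobol_lines(lines: List[str]) -> List[str]:
--     """Clean COBOL lines (extract columns 6-72, handle continuation)."""
--     cleaned = []
--     continuation_buffer = []
--
--     for line in lines:
--         # Extract columns 6-72 (standard COBOL format)
--         if len(line) > 6:
--             cobol_code = line[6:72].rstrip() if len(line) > 72 else line[6:].rstrip()
--         else:
--             cobol_code = line.rstrip()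
--
--         # Skip comments
--         if not cobol_code or cobol_code[0] in ('*', '/'):
--             continue
--
--         # Handle continuation (column 6 = '-')
--         if len(line) > 6 and line[6] == '-':
--             continuation_buffer.append(cobol_code)
--             continue
--
--         # Join continuation if exists
--         if continuation_buffer:
--             full_line = ' '.join(continuation_buffer) + ' ' + cobol_code
--             continuation_buffer = []
--             cleaned.append(full_line)
--         else:
--             cleaned.append(cobol_code)
--
--     return cleaned
-- ===== SOURCE B (Python) =====
-- from typing import List
--
-- def _clean_cobol_lines(lines: List[str]) -> List[str]:
--     """Clean COBOL lines: classify records, then scan runs with two indices —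
--     each output statement is one run of continuation records plus the normal
--     record that terminates it (a trailing run with no terminator is dropped)."""
--     recs = []
--     for line in lines:
--         if len(line) > 6:
--             code = line[6:72].rstrip() if len(line) > 72 else line[6:].rstrip()
--         else:
--             code = line.rstrip()
--         if code and code[0] not in ('*', '/'):
--             recs.append((len(line) > 6 and line[6] == '-', code))
--
--     out = []
--     i = 0
--     n = len(recs)
--     while i < n:
--         j = i
--         while j < n and recs[j][0]:
--             j += 1
--         if j == n:
--             break
--         out.append(' '.join([c for _, c in recs[i:j]] + [recs[j][1]]))
--         i = j + 1
--     return out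
-- ===== Notes on version B (the rewrite author's own statement) =====
-- stated objective: alternative
-- what changed: A carries a mutable pending-continuation buffer through one stateful loop and appends/flushes it per line; B instead classifies the records and then scans them with two indices, peeling off one maximal run of continuation records plus its terminating normal record per output statement and joining each whole run at once, with no buffer state.
import Mathlib
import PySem

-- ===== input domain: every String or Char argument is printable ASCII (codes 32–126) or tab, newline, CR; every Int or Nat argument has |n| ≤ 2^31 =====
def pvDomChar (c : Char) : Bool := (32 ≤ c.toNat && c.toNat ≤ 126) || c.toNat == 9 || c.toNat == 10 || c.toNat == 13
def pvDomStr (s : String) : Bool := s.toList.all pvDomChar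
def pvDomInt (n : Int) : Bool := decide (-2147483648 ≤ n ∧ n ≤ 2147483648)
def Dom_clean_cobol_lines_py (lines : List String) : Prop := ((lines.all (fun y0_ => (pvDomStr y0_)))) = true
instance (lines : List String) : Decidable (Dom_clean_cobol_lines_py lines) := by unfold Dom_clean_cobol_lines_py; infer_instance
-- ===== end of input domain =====

-- B replaces A's stateful pending-buffer loop by a run-scanning pass: classify the records,
-- then peel off one maximal continuation run plus its terminating normal record per output
-- statement (objective: alternative, not faster).

-- ===== PORT A =====
-- single fold over the lines with state (cleaned, continuation_buffer)
def clean_cobol_lines_py (lines : List String) : List String :=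
  (lines.foldl (fun (st : List String × List (List Char)) line =>
    let l := line.toList
    let cobol_code : List Char :=
      if l.length > 6 then
        if l.length > 72 then PySem.Chars.rstrip (PySem.List.slice l (some 6) (some 72))
        else PySem.Chars.rstrip (PySem.List.slice l (some 6) none)
      else PySem.Chars.rstrip l
    if cobol_code = [] ∨ cobol_code.head? = some '*' ∨ cobol_code.head? = some '/' then st
    else if l.length > 6 ∧ l[6]? = some '-' then (st.1, st.2 ++ [cobol_code])
    else if st.2 ≠ [] then
      (st.1 ++ [String.ofList (PySem.Chars.join [' '] st.2 ++ ' ' :: cobol_code)], [])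
    else (st.1 ++ [String.ofList cobol_code], st.2)) ([], [])).1

-- ===== PORT B =====
-- Source B's first loop: clean one line, drop comments/blank, tag records (continuation?, code)
def pvClassify (line : String) : Option (Bool × List Char) :=
  let l := line.toList
  let code : List Char :=
    if l.length > 6 then
      if l.length > 72 then PySem.Chars.rstrip (PySem.List.slice l (some 6) (some 72))
      else PySem.Chars.rstrip (PySem.List.slice l (some 6) none)
    else PySem.Chars.rstrip l
  if code = [] ∨ code.head? = some '*' ∨ code.head? = some '/' then none
  else some (decide (l.length > 6 ∧ l[6]? = some '-'), code)

-- Source B's inner index scan 'while j < n and recs[j][0]: j += 1' plus the slice recs[i:j],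
-- ported as structural recursion over the suffix (same traversal): returns the run of
-- continuation codes and the remaining records from position j on
def pvSplitRun : List (Bool × List Char) → List (List Char) × List (Bool × List Char)
  | [] => ([], [])
  | (true, c) :: rest => ((c :: (pvSplitRun rest).1), (pvSplitRun rest).2)
  | (false, c) :: rest => ([], (false, c) :: rest)

theorem pvSplitRun_snd_le (recs : List (Bool × List Char)) :
    (pvSplitRun recs).2.length ≤ recs.length := by
  induction recs with
  | nil => simp [pvSplitRun]
  | cons r rest ih =>
    obtain ⟨b, c⟩ := r
    cases b <;> simp [pvSplitRun] <;> omega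

-- Source B's outer 'while i < n' loop over the record suffix: one output per run + terminator;
-- a trailing run with no terminating normal record yields nothing ('if j == n: break')
def pvEmitRuns (recs : List (Bool × List Char)) : List String :=
  match h : pvSplitRun recs with
  | (_, []) => []
  | (conts, (_, code) :: rest) =>
      String.ofList (PySem.Chars.join [' '] (conts ++ [code])) :: pvEmitRuns rest
termination_by recs.length
decreasing_by
  have h2 := pvSplitRun_snd_le recs
  rw [h] at h2
  simp at h2
  omega

def clean_cobol_lines_py_alt (lines : List String) : List String :=
  pvEmitRuns (lines.filterMap pvClassify)

-- ===== PRECONDITION & SPEC =====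
def Spec_clean_cobol_lines_py (lines : List String) (out : List String) : Prop := out = clean_cobol_lines_py_alt lines
instance (lines : List String) (out : List String) : Decidable (Spec_clean_cobol_lines_py lines out) := by unfold Spec_clean_cobol_lines_py; infer_instance

-- ===== CLAIM (what is proved, stated in full; the proofs are below) =====
def Claim_equal_clean_cobol_lines_py : Prop := ∀ (lines : List String), Dom_clean_cobol_lines_py lines → Spec_clean_cobol_lines_py lines (clean_cobol_lines_py lines)

-- ===== LEMMAS AND PROOFS =====

-- proof-side name for A's fold body (definitionally equal to the lambda in clean_cobol_lines_py)
def pvStepA (st : List String × List (List Char)) (line : String) :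
    List String × List (List Char) :=
  let l := line.toList
  let cobol_code : List Char :=
    if l.length > 6 then
      if l.length > 72 then PySem.Chars.rstrip (PySem.List.slice l (some 6) (some 72))
      else PySem.Chars.rstrip (PySem.List.slice l (some 6) none)
    else PySem.Chars.rstrip l
  if cobol_code = [] ∨ cobol_code.head? = some '*' ∨ cobol_code.head? = some '/' then st
  else if l.length > 6 ∧ l[6]? = some '-' then (st.1, st.2 ++ [cobol_code])
  else if st.2 ≠ [] then
    (st.1 ++ [String.ofList (PySem.Chars.join [' '] st.2 ++ ' ' :: cobol_code)], [])
  else (st.1 ++ [String.ofList cobol_code], st.2)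

-- proof-side intermediate: pending-buffer reading of the joining pass
def pvEmit (recs : List (Bool × List Char)) (pending : List (List Char)) : List String :=
  match recs with
  | [] => []
  | (true, code) :: rest => pvEmit rest (pending ++ [code])
  | (false, code) :: rest =>
      String.ofList (PySem.Chars.join [' '] (pending ++ [code])) :: pvEmit rest []

-- A's step, characterized through B's classification of the line
theorem pvStepA_classify (st : List String × List (List Char)) (line : String) :
    pvStepA st line =
      match pvClassify line with
      | none => st
      | some (c, code) =>
        if c then (st.1, st.2 ++ [code])
        else if st.2 ≠ [] then
          (st.1 ++ [String.ofList (PySem.Chars.join [' '] st.2 ++ ' ' :: code)], [])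
        else (st.1 ++ [String.ofList code], st.2) := by
  unfold pvStepA pvClassify
  set l := line.toList with hl
  set code : List Char :=
    if l.length > 6 then
      if l.length > 72 then PySem.Chars.rstrip (PySem.List.slice l (some 6) (some 72))
      else PySem.Chars.rstrip (PySem.List.slice l (some 6) none)
    else PySem.Chars.rstrip l with hcode
  by_cases hskip : code = [] ∨ code.head? = some '*' ∨ code.head? = some '/'
  · rw [if_pos hskip, if_pos hskip]
  · rw [if_neg hskip, if_neg hskip]
    by_cases hcont : l.length > 6 ∧ l[6]? = some '-'
    · simp [hcont]
    · simp [hcont]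

-- ' '.join(pending + [code]) agrees with A's two-branch join
theorem pvJoin_append_singleton (xs : List (List Char)) (c : List Char) :
    PySem.Chars.join [' '] (xs ++ [c]) =
      if xs = [] then c else PySem.Chars.join [' '] xs ++ ' ' :: c := by
  induction xs with
  | nil => simp [PySem.Chars.join_singleton]
  | cons a xs ih =>
    cases xs with
    | nil => simp [PySem.Chars.join_cons_cons, PySem.Chars.join_singleton]
    | cons b ys =>
      simp only [List.cons_append, PySem.Chars.join_cons_cons] at *
      simp [ih]

-- loop invariant: A's fold from any state equals cleaned ++ the pending-buffer joining pass
theorem pvFold_eq_emit (lines : List String) (cleaned : List String)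
    (buffer : List (List Char)) :
    (lines.foldl pvStepA (cleaned, buffer)).1
      = cleaned ++ pvEmit (lines.filterMap pvClassify) buffer := by
  induction lines generalizing cleaned buffer with
  | nil => simp [pvEmit]
  | cons line rest ih =>
    rw [List.foldl_cons, List.filterMap_cons, pvStepA_classify]
    cases h : pvClassify line with
    | none => simp only [h]; exact ih cleaned buffer
    | some r =>
      obtain ⟨c, code⟩ := r
      cases c with
      | true =>
        simp only [h, if_pos]
        rw [ih cleaned (buffer ++ [code])]
        simp [pvEmit]
      | false =>
        simp only [Bool.false_eq_true, if_neg, not_false_eq_true]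
        by_cases hbuf : buffer = []
        · subst hbuf
          simp only [ne_eq, not_true_eq_false, if_neg, not_false_eq_true]
          rw [ih (cleaned ++ [String.ofList code]) []]
          simp [pvEmit]
        · simp only [ne_eq, hbuf, not_false_eq_true, if_pos]
          rw [ih (cleaned ++ [String.ofList (PySem.Chars.join [' '] buffer ++ ' ' :: code)]) []]
          simp [pvEmit, pvJoin_append_singleton, hbuf]

-- pvSplitRun consumes exactly a leading all-continuation prefix
theorem pvSplitRun_map_true (pending : List (List Char)) :
    pvSplitRun (pending.map (fun c => (true, c))) = (pending, []) := by
  induction pending with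
  | nil => simp [pvSplitRun]
  | cons a xs ih => simp [pvSplitRun, ih]

theorem pvSplitRun_stop (pending : List (List Char)) (c : List Char)
    (rest : List (Bool × List Char)) :
    pvSplitRun (pending.map (fun c => (true, c)) ++ (false, c) :: rest)
      = (pending, (false, c) :: rest) := by
  induction pending with
  | nil => simp [pvSplitRun]
  | cons a xs ih => simp [pvSplitRun, ih]

-- the pending-buffer pass equals B's run-scanning pass with the pending codes prepended as runs
theorem pvEmit_eq_runs (recs : List (Bool × List Char)) (pending : List (List Char)) :
    pvEmit recs pending = pvEmitRuns (pending.map (fun c => (true, c)) ++ recs) := by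
  induction recs generalizing pending with
  | nil =>
    rw [pvEmit, List.append_nil, pvEmitRuns.eq_def, pvSplitRun_map_true]
  | cons r rest ih =>
    obtain ⟨b, code⟩ := r
    cases b with
    | true =>
      rw [pvEmit, ih (pending ++ [code])]
      rw [List.map_append, List.append_assoc]
      rfl
    | false =>
      rw [pvEmit, pvEmitRuns.eq_def, pvSplitRun_stop, ih []]
      rfl

-- ===== VERDICT (by name: the statement is the Claim_ definition above) =====
theorem clean_cobol_lines_py_spec : Claim_equal_clean_cobol_lines_py := by
  intro lines _
  unfold Spec_clean_cobol_lines_py clean_cobol_lines_py clean_cobol_lines_py_alt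
  have h := pvFold_eq_emit lines [] []
  rw [pvEmit_eq_runs] at h
  simp only [List.map_nil, List.nil_append] at h
  exact h
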